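-- pv_equiv track=rewrite | github.com/JaeWorld/PS_everyday | BOJ/Recursion/9994.py | func
-- ===== SOURCE A (Python) =====
-- def func(s):
--     l = len(s)
--     res = 1
--     if l % 2 == 0 or l == 1:
--         return 1
--
--     if s[:l//2] == s[l//2:l-1]:
--         res += func(s[l//2:])
--
--     if s[:l//2] == s[l//2+1:l]:
--         res += func(s[:l//2+1])
--
--     if s[:l//2] == s[l//2+1:l]:
--         res += func(s[l//2:])
--
--     if s[1:l//2+1] == s[l//2+1:l]:
--         res += func(s[:l//2+1])
--
--     return res
-- ===== SOURCE B (Python) =====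
-- def func(s):
--     # Iterative: the recursion only counts calls, so walk the call tree with an
--     # explicit stack and a counter instead of recursing.
--     stack = [s]
--     count = 0
--     while stack:
--         t = stack.pop()
--         count += 1
--         l = len(t)
--         if l % 2 == 0 or l == 1:
--             continue
--         h = l // 2
--         left, right_a, right_b, mid = t[:h], t[h:l-1], t[h+1:l], t[1:h+1]
--         if left == right_a:
--             stack.append(t[h:])
--         if left == right_b:
--             stack.append(t[:h+1])
--         if left == right_b:
--             stack.append(t[h:])
--         if mid == right_b:
--             stack.append(t[:h+1])
--     return count
-- ===== Notes on version B (the rewrite author's own statement) =====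
-- stated objective: alternative
-- what changed: Replaces the four-way branching recursion by an iterative worklist: an explicit stack of pending substrings and a counter that counts the visited nodes of the call tree.
import Mathlib
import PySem

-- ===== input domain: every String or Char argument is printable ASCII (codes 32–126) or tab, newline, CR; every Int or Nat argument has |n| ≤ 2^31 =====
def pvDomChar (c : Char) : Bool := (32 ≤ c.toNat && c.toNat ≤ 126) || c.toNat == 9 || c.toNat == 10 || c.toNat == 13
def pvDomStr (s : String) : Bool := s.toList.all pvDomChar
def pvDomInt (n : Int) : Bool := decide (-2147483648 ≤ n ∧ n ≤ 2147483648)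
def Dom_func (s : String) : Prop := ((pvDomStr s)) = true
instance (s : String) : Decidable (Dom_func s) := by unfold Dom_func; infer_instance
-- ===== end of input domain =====

-- B replaces A's four-way branching recursion by an explicit stack and a counter (same count, different decomposition; no speed claim).

-- ===== PORT A =====
-- Recursive core over the character list; l, l//2, l-1 are Python's nonnegative
-- ints here, so Nat `/`, `%`, `-` are exact (l - 1 is only used when l ≥ 3).
-- The Nat fuel is only a structural-recursion guard: every recursive call gets a
-- strictly shorter list, so fuel = length + 1 never runs out (funcACore_congr).
def funcACore : Nat → List Char → Int
  | 0, _ => 1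
  | fuel + 1, cs =>
    let l := cs.length
    if l % 2 = 0 ∨ l = 1 then 1
    else
      let h := l / 2
      let res : Int := 1
      let res := if PySem.List.slice cs none (some (h : Int)) = PySem.List.slice cs (some (h : Int)) (some ((l - 1 : Nat) : Int)) then
          res + funcACore fuel (PySem.List.slice cs (some (h : Int)) none) else res
      let res := if PySem.List.slice cs none (some (h : Int)) = PySem.List.slice cs (some ((h + 1 : Nat) : Int)) (some ((l : Nat) : Int)) then
          res + funcACore fuel (PySem.List.slice cs none (some ((h + 1 : Nat) : Int))) else res
      let res := if PySem.List.slice cs none (some (h : Int)) = PySem.List.slice cs (some ((h + 1 : Nat) : Int)) (some ((l : Nat) : Int)) then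
          res + funcACore fuel (PySem.List.slice cs (some (h : Int)) none) else res
      let res := if PySem.List.slice cs (some ((1 : Nat) : Int)) (some ((h + 1 : Nat) : Int)) = PySem.List.slice cs (some ((h + 1 : Nat) : Int)) (some ((l : Nat) : Int)) then
          res + funcACore fuel (PySem.List.slice cs none (some ((h + 1 : Nat) : Int))) else res
      res

def func (s : String) : Int := funcACore (s.toList.length + 1) s.toList

-- ===== PORT B =====
-- measure of the worklist: bounds the number of loop iterations (each pushed
-- child is strictly shorter than the popped string), used as the loop's fuel
def pvMeas (st : List (List Char)) : Nat := (st.map (fun t => 5 ^ t.length)).sum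

-- transliteration of Source B's while loop (stack of pending substrings, counter);
-- pushing children as a front batch instead of `append`+`pop`-from-the-end
-- visits the same multiset of nodes, and only the count is returned
def funcAltLoop : Nat → List (List Char) → Int → Int
  | 0, _, count => count
  | fuel + 1, st, count =>
    match st with
    | [] => count
    | t :: rest =>
      let l := t.length
      if l % 2 = 0 ∨ l = 1 then funcAltLoop fuel rest (count + 1)
      else
        let h := l / 2
        let left := PySem.List.slice t none (some (h : Int))
        let rightA := PySem.List.slice t (some (h : Int)) (some ((l - 1 : Nat) : Int))
        let rightB := PySem.List.slice t (some ((h + 1 : Nat) : Int)) (some ((l : Nat) : Int))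
        let mid := PySem.List.slice t (some ((1 : Nat) : Int)) (some ((h + 1 : Nat) : Int))
        let kids :=
          (if left = rightA then [PySem.List.slice t (some (h : Int)) none] else []) ++
          (if left = rightB then [PySem.List.slice t none (some ((h + 1 : Nat) : Int))] else []) ++
          (if left = rightB then [PySem.List.slice t (some (h : Int)) none] else []) ++
          (if mid = rightB then [PySem.List.slice t none (some ((h + 1 : Nat) : Int))] else [])
        funcAltLoop fuel (kids ++ rest) (count + 1)

def func_alt (s : String) : Int := funcAltLoop (pvMeas [s.toList]) [s.toList] 0

-- ===== PRECONDITION & SPEC =====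
def Spec_func (s : String) (out : Int) : Prop := out = func_alt s
instance (s : String) (out : Int) : Decidable (Spec_func s out) := by unfold Spec_func; infer_instance

-- ===== CLAIM (what is proved, stated in full; the proofs are below) =====
def Claim_equal_func : Prop := ∀ (s : String), Dom_func s → Spec_func s (func s)

-- ===== LEMMAS AND PROOFS =====
lemma pvMeas_kids_lt (t : List Char) (rest kids : List (List Char))
    (hodd : t.length % 2 = 1) (h3 : 3 ≤ t.length)
    (hk : ∀ u ∈ kids, u.length = t.length / 2 + 1) (hc : kids.length ≤ 4) :
    pvMeas (kids ++ rest) < pvMeas (t :: rest) := by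
  have hsum : (kids.map (fun u => 5 ^ u.length)).sum ≤ kids.length * 5 ^ (t.length / 2 + 1) := by
    have := List.sum_le_card_nsmul (kids.map (fun u => 5 ^ u.length)) (5 ^ (t.length / 2 + 1))
      (by intro x hx; simp only [List.mem_map] at hx; obtain ⟨u, hu, rfl⟩ := hx; rw [hk u hu])
    simpa using this
  have hle : t.length / 2 + 1 ≤ t.length - 1 := by omega
  have hpow : 4 * 5 ^ (t.length / 2 + 1) < 5 ^ t.length := by
    calc 4 * 5 ^ (t.length / 2 + 1) ≤ 4 * 5 ^ (t.length - 1) := by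
          exact Nat.mul_le_mul_left 4 (Nat.pow_le_pow_right (by norm_num) hle)
      _ < 5 * 5 ^ (t.length - 1) := by
          have h0 : 0 < 5 ^ (t.length - 1) := Nat.pow_pos (by norm_num)
          linarith
      _ = 5 ^ t.length := by rw [← pow_succ']; congr 1; omega
  have hkc : kids.length * 5 ^ (t.length / 2 + 1) ≤ 4 * 5 ^ (t.length / 2 + 1) :=
    Nat.mul_le_mul_right _ hc
  simp only [pvMeas, List.map_append, List.sum_append, List.map_cons, List.sum_cons]
  omega

lemma pv_mem_ite_singleton {α : Type} {c : Prop} [Decidable c] {x u : α}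
    (h : u ∈ if c then [x] else []) : u = x := by split at h <;> simp_all

-- enough fuel: the result of funcACore does not depend on the fuel once it
-- exceeds the list length (every recursive call strictly shortens the list)
lemma funcACore_congr (n : Nat) : ∀ (cs : List Char) (f1 f2 : Nat),
    cs.length ≤ n → cs.length < f1 → cs.length < f2 →
    funcACore f1 cs = funcACore f2 cs := by
  induction n with
  | zero =>
    intro cs f1 f2 hn h1 h2
    obtain ⟨a, rfl⟩ : ∃ a, f1 = a + 1 := ⟨f1 - 1, by omega⟩
    obtain ⟨b, rfl⟩ : ∃ b, f2 = b + 1 := ⟨f2 - 1, by omega⟩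
    have hl : cs.length = 0 := by omega
    simp [funcACore, hl]
  | succ n ih =>
    intro cs f1 f2 hn h1 h2
    obtain ⟨a, rfl⟩ : ∃ a, f1 = a + 1 := ⟨f1 - 1, by omega⟩
    obtain ⟨b, rfl⟩ : ∃ b, f2 = b + 1 := ⟨f2 - 1, by omega⟩
    simp only [funcACore]
    by_cases hb : cs.length % 2 = 0 ∨ cs.length = 1
    · rw [if_pos hb, if_pos hb]
    · rw [if_neg hb, if_neg hb]
      have hlen_d : (PySem.List.slice cs (some ((cs.length / 2 : Nat) : Int)) none).length ≤ cs.length - 1 := by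
        simp only [PySem.List.slice_from_natCast, List.length_drop]; omega
      have hlen_t : (PySem.List.slice cs none (some ((cs.length / 2 + 1 : Nat) : Int))).length ≤ cs.length - 1 := by
        simp only [PySem.List.slice_to_natCast, List.length_take]; omega
      have hd : funcACore a (PySem.List.slice cs (some ((cs.length / 2 : Nat) : Int)) none)
          = funcACore b (PySem.List.slice cs (some ((cs.length / 2 : Nat) : Int)) none) := by
        apply ih <;> omega
      have ht : funcACore a (PySem.List.slice cs none (some ((cs.length / 2 + 1 : Nat) : Int)))
          = funcACore b (PySem.List.slice cs none (some ((cs.length / 2 + 1 : Nat) : Int))) := by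
        apply ih <;> omega
      rw [hd, ht]

lemma funcACore_base (f : Nat) (cs : List Char) (hb : cs.length % 2 = 0 ∨ cs.length = 1) :
    funcACore f cs = 1 := by
  cases f with
  | zero => rfl
  | succ f => simp only [funcACore, if_pos hb]

set_option maxHeartbeats 2000000 in
lemma pvLoop_eq (fuel : Nat) : ∀ (st : List (List Char)) (c : Int), pvMeas st ≤ fuel →
    funcAltLoop fuel st c = c + (st.map (fun t => funcACore (t.length + 1) t)).sum := by
  induction fuel with
  | zero =>
    intro st c hm
    cases st with
    | nil => simp [funcAltLoop]
    | cons t rest =>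
      exfalso
      have : 0 < 5 ^ t.length := Nat.pow_pos (by norm_num)
      simp only [pvMeas, List.map_cons, List.sum_cons] at hm; omega
  | succ fuel ih =>
    intro st c hm
    cases st with
    | nil => simp [funcAltLoop]
    | cons t rest =>
      simp only [funcAltLoop, List.map_cons, List.sum_cons]
      by_cases hb : t.length % 2 = 0 ∨ t.length = 1
      · rw [if_pos hb, ih rest (c + 1) (by
          have : 0 < 5 ^ t.length := Nat.pow_pos (by norm_num)
          simp only [pvMeas, List.map_cons, List.sum_cons] at hm ⊢; omega)]
        rw [funcACore_base (t.length + 1) t hb]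
        ring
      · rw [if_neg hb]
        have hlt : pvMeas (((if PySem.List.slice t none (some ((t.length / 2 : Nat) : Int)) = PySem.List.slice t (some ((t.length / 2 : Nat) : Int)) (some ((t.length - 1 : Nat) : Int)) then [PySem.List.slice t (some ((t.length / 2 : Nat) : Int)) none] else []) ++
            (if PySem.List.slice t none (some ((t.length / 2 : Nat) : Int)) = PySem.List.slice t (some ((t.length / 2 + 1 : Nat) : Int)) (some ((t.length : Nat) : Int)) then [PySem.List.slice t none (some ((t.length / 2 + 1 : Nat) : Int))] else []) ++
            (if PySem.List.slice t none (some ((t.length / 2 : Nat) : Int)) = PySem.List.slice t (some ((t.length / 2 + 1 : Nat) : Int)) (some ((t.length : Nat) : Int)) then [PySem.List.slice t (some ((t.length / 2 : Nat) : Int)) none] else []) ++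
            (if PySem.List.slice t (some ((1 : Nat) : Int)) (some ((t.length / 2 + 1 : Nat) : Int)) = PySem.List.slice t (some ((t.length / 2 + 1 : Nat) : Int)) (some ((t.length : Nat) : Int)) then [PySem.List.slice t none (some ((t.length / 2 + 1 : Nat) : Int))] else [])) ++ rest) < pvMeas (t :: rest) := by
          apply pvMeas_kids_lt t rest _ (by omega) (by omega)
          · intro u hu
            simp only [List.mem_append] at hu
            rcases hu with ((hu | hu) | hu) | hu <;>
              rw [pv_mem_ite_singleton hu] <;>
              simp only [PySem.List.slice_from_natCast, PySem.List.slice_to_natCast,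
                List.length_drop, List.length_take] <;> omega
          · split_ifs <;> simp
        have hmk : pvMeas (t :: rest) ≤ fuel + 1 := hm
        rw [ih _ (c + 1) (by omega), funcACore, if_neg hb]
        simp only []
        have hd : funcACore t.length (PySem.List.slice t (some ((t.length / 2 : Nat) : Int)) none)
            = funcACore ((PySem.List.slice t (some ((t.length / 2 : Nat) : Int)) none).length + 1) (PySem.List.slice t (some ((t.length / 2 : Nat) : Int)) none) := by
          apply funcACore_congr ((PySem.List.slice t (some ((t.length / 2 : Nat) : Int)) none).length) <;>
            simp only [PySem.List.slice_from_natCast, List.length_drop] <;> omega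
        have ht : funcACore t.length (PySem.List.slice t none (some ((t.length / 2 + 1 : Nat) : Int)))
            = funcACore ((PySem.List.slice t none (some ((t.length / 2 + 1 : Nat) : Int))).length + 1) (PySem.List.slice t none (some ((t.length / 2 + 1 : Nat) : Int))) := by
          apply funcACore_congr ((PySem.List.slice t none (some ((t.length / 2 + 1 : Nat) : Int))).length) <;>
            simp only [PySem.List.slice_to_natCast, List.length_take] <;> omega
        rw [hd, ht]
        split_ifs <;>
          simp only [List.map_append, List.sum_append, List.map_cons, List.sum_cons,
            List.map_nil, List.sum_nil] <;> ring

lemma pvCore_eq_alt (cs : List Char) : funcAltLoop (pvMeas [cs]) [cs] 0 = funcACore (cs.length + 1) cs := by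
  rw [pvLoop_eq (pvMeas [cs]) [cs] 0 (le_refl _)]
  simp

-- ===== VERDICT (by name: the statement is the Claim_ definition above) =====
theorem func_spec : Claim_equal_func := by
  intro s _
  unfold Spec_func func func_alt
  exact (pvCore_eq_alt s.toList).symm
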